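-- pv_equiv track=rewrite | github.com/alyssaschaubroeck/Informatica5 | 12b - Roosters/Kleurendriehoek.py | driehoek
-- ===== SOURCE A (Python) =====
-- def volgende_rij(rij):
--     volgende = []
--     for i in range(len(rij) - 1):
--         if rij[i] == rij[i + 1]:
--             volgende.append(rij[i])
--         elif rij[i] != rij[i + 1]:
--             kleur = ['Y', 'R', 'G']
--             kleur.remove(rij[i])
--             kleur.remove(rij[i + 1])
--             volgende.append(kleur[0])
--     return volgende
--
-- def driehoek(rij):
--     volledig = []
--     i = 0
--     volledig.append(rij)
--     while len(volledig[i]) > 1: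
--         volgend = volgende_rij(volledig[i])
--         volledig.append(volgend)
--         i += 1
--     return volledig
-- ===== SOURCE B (Python) =====
-- def _derde(a, b):
--     if a != 'Y' and b != 'Y':
--         return 'Y'
--     if a != 'R' and b != 'R':
--         return 'R'
--     return 'G'
--
-- def driehoek(rij):
--     if len(rij) <= 1:
--         return [rij]
--     volgende = [a if a == b else _derde(a, b) for a, b in zip(rij, rij[1:])]
--     return [rij] + driehoek(volgende)
-- ===== Notes on version B (the rewrite author's own statement) =====
-- stated objective: simpler
-- what changed: driehoek is rewritten as structural recursion on the shrinking row ([rij] + driehoek(next)) instead of a while loop with an index counter into a growing accumulator, and the next row is a single zip-pair comprehension with a branch-free third-colour helper instead of an index loop doing two list.remove calls.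
import Mathlib
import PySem

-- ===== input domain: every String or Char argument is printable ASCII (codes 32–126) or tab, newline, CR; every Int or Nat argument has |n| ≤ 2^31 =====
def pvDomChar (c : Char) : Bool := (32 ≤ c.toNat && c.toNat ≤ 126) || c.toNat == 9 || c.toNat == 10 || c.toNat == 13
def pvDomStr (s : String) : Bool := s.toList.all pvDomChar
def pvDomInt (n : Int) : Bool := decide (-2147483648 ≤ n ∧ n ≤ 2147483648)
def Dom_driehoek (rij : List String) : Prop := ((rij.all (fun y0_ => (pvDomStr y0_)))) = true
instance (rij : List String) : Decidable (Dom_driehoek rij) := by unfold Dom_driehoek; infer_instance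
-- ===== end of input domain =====

-- B rewrites the while-loop/index/accumulator as structural recursion on the shrinking row and
-- builds the next row with a zip-pair comprehension (objective: simpler).

-- ===== PORT A =====
-- volgende_rij: index loop; list.remove is PySem.List.remove? (none = ValueError, excluded by Pre_,
-- made total here with .getD [] — garbage only outside Pre_).
def volgendeRijA (rij : List String) : List String :=
  (PySem.List.pyRange 0 ((rij.length : Int) - 1) 1).foldl
    (fun volgende i =>
      if PySem.List.pyGetD rij i "" = PySem.List.pyGetD rij (i + 1) "" then
        volgende ++ [PySem.List.pyGetD rij i ""]
      else if PySem.List.pyGetD rij i "" ≠ PySem.List.pyGetD rij (i + 1) "" then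
        volgende ++
          [PySem.List.pyGetD
            ((PySem.List.remove?
              ((PySem.List.remove? ["Y", "R", "G"] (PySem.List.pyGetD rij i "")).getD [])
              (PySem.List.pyGetD rij (i + 1) "")).getD []) 0 ""]
      else volgende)
    []

-- closed form of volgende_rij's loop; cited by driehoekLoop's termination proof, so it stays above it
theorem volgendeRijA_eq_map (rij : List String) :
    volgendeRijA rij =
      (PySem.List.pyRange 0 ((rij.length : Int) - 1) 1).map
        (fun i =>
          if PySem.List.pyGetD rij i "" = PySem.List.pyGetD rij (i + 1) "" then
            PySem.List.pyGetD rij i ""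
          else
            PySem.List.pyGetD
              ((PySem.List.remove?
                ((PySem.List.remove? ["Y", "R", "G"] (PySem.List.pyGetD rij i "")).getD [])
                (PySem.List.pyGetD rij (i + 1) "")).getD []) 0 "") := by
  unfold volgendeRijA
  rw [show (fun (volgende : List String) (i : Int) =>
      if PySem.List.pyGetD rij i "" = PySem.List.pyGetD rij (i + 1) "" then
        volgende ++ [PySem.List.pyGetD rij i ""]
      else if PySem.List.pyGetD rij i "" ≠ PySem.List.pyGetD rij (i + 1) "" then
        volgende ++
          [PySem.List.pyGetD
            ((PySem.List.remove?
              ((PySem.List.remove? ["Y", "R", "G"] (PySem.List.pyGetD rij i "")).getD [])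
              (PySem.List.pyGetD rij (i + 1) "")).getD []) 0 ""]
      else volgende) =
      (fun volgende i => volgende ++
        [if PySem.List.pyGetD rij i "" = PySem.List.pyGetD rij (i + 1) "" then
            PySem.List.pyGetD rij i ""
          else
            PySem.List.pyGetD
              ((PySem.List.remove?
                ((PySem.List.remove? ["Y", "R", "G"] (PySem.List.pyGetD rij i "")).getD [])
                (PySem.List.pyGetD rij (i + 1) "")).getD []) 0 ""]) from by
        funext volgende i
        by_cases h : PySem.List.pyGetD rij i "" = PySem.List.pyGetD rij (i + 1) "" <;> simp [h]]
  rw [PySem.List.foldl_append_singleton_eq_map]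
  simp

theorem volgendeRijA_length (rij : List String) :
    (volgendeRijA rij).length = ((rij.length : Int) - 1).toNat := by
  rw [volgendeRijA_eq_map]
  simp [PySem.List.length_pyRange_one]

-- the while loop of driehoek: volledig[i] is always the last appended row
def driehoekLoop (cur : List String) (acc : List (List String)) : List (List String) :=
  if cur.length > 1 then
    driehoekLoop (volgendeRijA cur) (acc ++ [volgendeRijA cur])
  else acc
termination_by cur.length
decreasing_by
  rw [volgendeRijA_length]; omega

def driehoek (rij : List String) : List (List String) :=
  driehoekLoop rij [rij]

-- ===== PORT B =====
def derde (a b : String) : String :=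
  if a ≠ "Y" ∧ b ≠ "Y" then "Y" else if a ≠ "R" ∧ b ≠ "R" then "R" else "G"

def volgendeRijB (rij : List String) : List String :=
  (rij.zip rij.tail).map (fun p => if p.1 = p.2 then p.1 else derde p.1 p.2)

def driehoek_alt (rij : List String) : List (List String) :=
  if rij.length ≤ 1 then [rij]
  else rij :: driehoek_alt (volgendeRijB rij)
termination_by rij.length
decreasing_by
  simp only [volgendeRijB, List.length_map, List.length_zip, List.length_tail]
  omega

-- ===== PRECONDITION & SPEC =====
-- Pre_ excludes exactly the inputs on which A raises ValueError (list.remove on a missing element):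
-- rows containing two distinct adjacent entries not both among 'Y','R','G'; equivalently A returns
-- normally iff all entries are colours or all entries are equal (which covers length ≤ 1).
def Pre_driehoek (rij : List String) : Prop :=
  (∀ x ∈ rij, x = "Y" ∨ x = "R" ∨ x = "G") ∨ (∀ x ∈ rij, ∀ y ∈ rij, x = y)
instance (rij : List String) : Decidable (Pre_driehoek rij) := by unfold Pre_driehoek; infer_instance

def pvWitness_driehoek : List String := (["Y", "R", "G", "G"])

def Spec_driehoek (rij : List String) (out : List (List String)) : Prop := out = driehoek_alt rij
instance (rij : List String) (out : List (List String)) : Decidable (Spec_driehoek rij out) := by unfold Spec_driehoek; infer_instance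

-- ===== CLAIM (what is proved, stated in full; the proofs are below) =====
def Claim_equal_driehoek : Prop := ∀ (rij : List String), Dom_driehoek rij → Pre_driehoek rij → Spec_driehoek rij (driehoek rij)

-- ===== LEMMAS AND PROOFS =====

-- index-loop over pairs (rij[i], rij[i+1]) = map over zip of the list with its tail
theorem map_idx_pairs (f : String → String → String) :
    ∀ (rij : List String),
      (PySem.List.pyRange 0 ((rij.length : Int) - 1) 1).map
          (fun i => f (PySem.List.pyGetD rij i "") (PySem.List.pyGetD rij (i + 1) "")) =
        (rij.zip rij.tail).map (fun p => f p.1 p.2) := by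
  intro rij
  induction rij with
  | nil => rw [PySem.List.pyRange_one_eq_nil (by simp)]; simp
  | cons a rest ih =>
    cases rest with
    | nil => rw [PySem.List.pyRange_one_eq_nil (by simp)]; simp
    | cons b rest' =>
      rw [PySem.List.pyRange_one] at ih ⊢
      simp only [List.length_cons] at ih ⊢
      rw [show (((rest'.length + 1 + 1 : Nat) : Int) - 1 - 0).toNat = rest'.length + 1 from by simp]
      rw [show (((rest'.length + 1 : Nat) : Int) - 1 - 0).toNat = rest'.length from by simp] at ih
      rw [List.range_succ_eq_map]
      simp only [List.map_cons, List.map_map]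
      have hz : ((a :: b :: rest').zip (a :: b :: rest').tail) =
          (a, b) :: ((b :: rest').zip (b :: rest').tail) := by simp
      rw [hz, List.map_cons]
      congr 1
      · norm_num
        rw [show (1 : Int) = ((1 : Nat) : Int) from by norm_num, PySem.List.pyGetD_natCast]
        simp [List.getD]
      · rw [← ih]
        simp only [List.map_map]
        apply List.map_congr_left
        intro k _
        simp only [Function.comp_apply]
        congr 1
        · rw [show (0 + ((k.succ : Nat) : Int)) = ((k + 1 : Nat) : Int) from by push_cast; ring,
            show ((0 : Int) + (k : Int)) = ((k : Nat) : Int) from by ring,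
            PySem.List.pyGetD_natCast, PySem.List.pyGetD_natCast]
          simp [List.getD]
        · rw [show (0 + ((k.succ : Nat) : Int) + 1) = ((k + 2 : Nat) : Int) from by push_cast; ring,
            show ((0 : Int) + (k : Int) + 1) = ((k + 1 : Nat) : Int) from by push_cast; ring,
            PySem.List.pyGetD_natCast, PySem.List.pyGetD_natCast]
          simp [List.getD]

-- under Pre_, each adjacent pair is handled identically by the two row builders
theorem pair_eq (rij : List String) (h : Pre_driehoek rij) (p : String × String)
    (hp : p ∈ rij.zip rij.tail) :
    (if p.1 = p.2 then p.1
      else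
        PySem.List.pyGetD
          ((PySem.List.remove? ((PySem.List.remove? ["Y", "R", "G"] p.1).getD []) p.2).getD [])
          0 "") =
    (if p.1 = p.2 then p.1 else derde p.1 p.2) := by
  obtain ⟨u, v⟩ := p
  have h1 : u ∈ rij := (List.of_mem_zip hp).1
  have h2 : v ∈ rij := List.mem_of_mem_tail (List.of_mem_zip hp).2
  by_cases he : u = v
  · simp [he]
  · simp only [if_neg he]
    rcases h with hc | hall
    · rcases hc u h1 with ha | ha | ha <;> rcases hc v h2 with hb | hb | hb <;>
        simp_all [derde, PySem.List.remove?] <;> decide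
    · exact absurd (hall u h1 v h2) he

theorem rowA_eq_rowB (rij : List String) (h : Pre_driehoek rij) :
    volgendeRijA rij = volgendeRijB rij := by
  rw [volgendeRijA_eq_map, volgendeRijB,
    map_idx_pairs (fun a b =>
      if a = b then a
      else
        PySem.List.pyGetD
          ((PySem.List.remove? ((PySem.List.remove? ["Y", "R", "G"] a).getD []) b).getD []) 0 "")
      rij]
  exact List.map_congr_left (fun p hp => pair_eq rij h p hp)

theorem pre_next (rij : List String) (h : Pre_driehoek rij) :
    Pre_driehoek (volgendeRijB rij) := by
  rcases h with hc | hall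
  · left
    intro x hx
    simp only [volgendeRijB, List.mem_map] at hx
    obtain ⟨p, hp, rfl⟩ := hx
    obtain ⟨u, v⟩ := p
    by_cases he : u = v
    · simpa [he] using hc u (List.of_mem_zip hp).1
    · simp only [if_neg he, derde]
      split_ifs <;> simp
  · right
    intro x hx y hy
    simp only [volgendeRijB, List.mem_map] at hx hy
    obtain ⟨p, hp, rfl⟩ := hx
    obtain ⟨q, hq, rfl⟩ := hy
    obtain ⟨u, v⟩ := p
    obtain ⟨w, z⟩ := q
    have hp1 : u ∈ rij := (List.of_mem_zip hp).1
    have hp2 : v ∈ rij := List.mem_of_mem_tail (List.of_mem_zip hp).2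
    have hq1 : w ∈ rij := (List.of_mem_zip hq).1
    have hq2 : z ∈ rij := List.mem_of_mem_tail (List.of_mem_zip hq).2
    rw [if_pos (hall u hp1 v hp2), if_pos (hall w hq1 z hq2)]
    exact hall u hp1 w hq1

theorem alt_cons (rij : List String) : driehoek_alt rij = rij :: (driehoek_alt rij).tail := by
  rw [driehoek_alt]
  split <;> simp

theorem loop_eq : ∀ (n : Nat) (cur : List String) (acc : List (List String)),
    cur.length = n → Pre_driehoek cur →
    driehoekLoop cur acc = acc ++ (driehoek_alt cur).tail := by
  intro n
  induction n using Nat.strong_induction_on with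
  | _ n ih =>
    intro cur acc hlen hpre
    rw [driehoekLoop]
    by_cases h : cur.length > 1
    · rw [if_pos h]
      have hrow := rowA_eq_rowB cur hpre
      have hpre' := pre_next cur hpre
      have hlen' : (volgendeRijA cur).length = cur.length - 1 := by
        rw [volgendeRijA_length]; omega
      rw [ih (cur.length - 1) (by omega) _ _ hlen' (hrow ▸ hpre')]
      conv_rhs => rw [driehoek_alt, if_neg (by omega)]
      rw [hrow, List.tail_cons, List.append_assoc]
      congr 1
      exact (alt_cons (volgendeRijB cur)).symm
    · rw [if_neg h]
      rw [driehoek_alt, if_pos (by omega)]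
      simp

-- ===== VERDICT (by name: the statement is the Claim_ definition above) =====
theorem driehoek_spec : Claim_equal_driehoek := by
  intro rij _ hpre
  unfold Spec_driehoek driehoek
  rw [loop_eq rij.length rij [rij] rfl hpre]
  conv_rhs => rw [alt_cons rij]
  simp
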